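-- pv_equiv track=rewrite | github.com/udayanbb/Coursework | Graph Search.py | level_has_been_extended
-- ===== SOURCE A (Python) =====
-- def level_has_been_extended(paths):
--     max_len = 0
--     for path in paths:
--         max_len = max(len(path), max_len)
--     for path in paths:
--         if len(path) < max_len:
--             #print 'Not extended: ', paths
--             return False
--     #print 'Extended'
--     return True
-- ===== SOURCE B (Python) =====
-- def level_has_been_extended(paths):
--     return len({len(path) for path in paths}) <= 1
-- ===== Notes on version B (the rewrite author's own statement) =====
-- stated objective: simpler
-- what changed: Replaces A's two loops (max-tracking pass plus a comparison pass with early return) by a single set comprehension over path lengths and a cardinality test.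
import Mathlib
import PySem

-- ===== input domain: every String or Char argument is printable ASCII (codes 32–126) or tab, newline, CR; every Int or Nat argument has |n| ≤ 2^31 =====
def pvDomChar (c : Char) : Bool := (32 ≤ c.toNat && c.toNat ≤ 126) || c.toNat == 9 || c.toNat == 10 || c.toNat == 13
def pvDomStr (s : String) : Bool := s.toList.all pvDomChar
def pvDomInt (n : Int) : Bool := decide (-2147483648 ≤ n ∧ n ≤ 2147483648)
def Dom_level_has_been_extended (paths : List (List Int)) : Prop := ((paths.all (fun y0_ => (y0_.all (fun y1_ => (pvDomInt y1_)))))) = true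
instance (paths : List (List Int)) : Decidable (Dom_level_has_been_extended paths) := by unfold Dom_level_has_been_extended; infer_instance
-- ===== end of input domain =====

-- B replaces A's max-tracking loop + comparison loop by one set of path lengths and a cardinality test (simpler, same cost).

-- ===== PORT A =====
-- second loop of A, with its early 'return False'
def pvCheckA (paths : List (List Int)) (max_len : Int) : Bool :=
  match paths with
  | [] => true
  | path :: rest => if (path.length : Int) < max_len then false else pvCheckA rest max_len

def level_has_been_extended (paths : List (List Int)) : Bool :=
  let max_len : Int := paths.foldl (fun m path => max (path.length : Int) m) 0
  pvCheckA paths max_len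

-- ===== PORT B =====
def level_has_been_extended_alt (paths : List (List Int)) : Bool :=
  decide ((PySem.Set.ofList (paths.map (fun path => (path.length : Int)))).length ≤ 1)

-- ===== PRECONDITION & SPEC =====
def Spec_level_has_been_extended (paths : List (List Int)) (out : Bool) : Prop := out = level_has_been_extended_alt paths
instance (paths : List (List Int)) (out : Bool) : Decidable (Spec_level_has_been_extended paths out) := by unfold Spec_level_has_been_extended; infer_instance

-- ===== CLAIM (what is proved, stated in full; the proofs are below) =====
def Claim_equal_level_has_been_extended : Prop := ∀ (paths : List (List Int)), Dom_level_has_been_extended paths → Spec_level_has_been_extended paths (level_has_been_extended paths)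

-- ===== LEMMAS AND PROOFS =====

theorem pvCheckA_eq_all (paths : List (List Int)) (m : Int) :
    pvCheckA paths m = paths.all (fun path => !decide ((path.length : Int) < m)) := by
  induction paths with
  | nil => rfl
  | cons p rest ih =>
      simp only [pvCheckA, List.all_cons, ih]
      by_cases h : (p.length : Int) < m <;> simp [h]

theorem init_le_foldl_max (lens : List Int) (a : Int) :
    a ≤ lens.foldl (fun m x => max x m) a := by
  induction lens generalizing a with
  | nil => simp
  | cons x xs ih => exact le_trans (le_max_right x a) (ih (max x a))

theorem le_foldl_max (lens : List Int) (a l : Int) (hl : l ∈ lens) :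
    l ≤ lens.foldl (fun m x => max x m) a := by
  induction lens generalizing a with
  | nil => cases hl
  | cons x xs ih =>
      rw [List.mem_cons] at hl
      rcases hl with rfl | h
      · exact le_trans (le_max_left l a) (init_le_foldl_max xs (max l a))
      · exact ih _ h

theorem set_len_le_one_iff (lens : List Int) :
    (PySem.Set.ofList lens).length ≤ 1 ↔ ∀ a ∈ lens, ∀ b ∈ lens, a = b := by
  constructor
  · intro h a ha b hb
    have ha' : a ∈ PySem.Set.ofList lens := (PySem.Set.mem_ofList _ _).2 ha
    have hb' : b ∈ PySem.Set.ofList lens := (PySem.Set.mem_ofList _ _).2 hb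
    match hs : PySem.Set.ofList lens with
    | [] => rw [hs] at ha'; cases ha'
    | [c] =>
        rw [hs] at ha' hb'
        simp at ha' hb'; rw [ha', hb']
    | c :: d :: _ => rw [hs] at h; simp at h
  · intro h
    have hnd : (PySem.Set.ofList lens).Nodup := PySem.Set.nodup_ofList lens
    have hmem : ∀ x ∈ PySem.Set.ofList lens, ∀ y ∈ PySem.Set.ofList lens, x = y := by
      intro x hx y hy
      exact h x ((PySem.Set.mem_ofList _ _).1 hx) y ((PySem.Set.mem_ofList _ _).1 hy)
    match hs : PySem.Set.ofList lens with
    | [] => simp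
    | [c] => simp
    | c :: d :: _ =>
        rw [hs] at hnd hmem
        have : c = d := hmem c (by simp) d (by simp)
        simp [this] at hnd

theorem level_has_been_extended_eq (paths : List (List Int)) :
    level_has_been_extended paths = level_has_been_extended_alt paths := by
  unfold level_has_been_extended level_has_been_extended_alt
  rw [pvCheckA_eq_all]
  set M : Int := paths.foldl (fun m path => max (path.length : Int) m) 0 with hM
  have hMfold : M = (paths.map (fun path => (path.length : Int))).foldl (fun m x => max x m) 0 := by
    rw [hM, List.foldl_map]
  rcases paths with _ | ⟨p0, rest⟩
  · simp [PySem.Set.ofList]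
  · set lens := ((p0 :: rest).map (fun path => (path.length : Int))) with hlens
    rw [Bool.eq_iff_iff]
    simp only [List.all_eq_true, decide_eq_true_eq, Bool.not_eq_true', decide_eq_false_iff_not, not_lt]
    rw [set_len_le_one_iff]
    constructor
    · intro h a ha b hb
      rw [hlens] at ha hb
      simp only [List.mem_map] at ha hb
      obtain ⟨pa, hpa, rfl⟩ := ha
      obtain ⟨pb, hpb, rfl⟩ := hb
      have h1 : (pa.length : Int) ≤ M := by
        rw [hMfold]; exact le_foldl_max _ _ _ (List.mem_map_of_mem hpa)
      have h2 : (pb.length : Int) ≤ M := by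
        rw [hMfold]; exact le_foldl_max _ _ _ (List.mem_map_of_mem hpb)
      have g1 := h pa hpa
      have g2 := h pb hpb
      omega
    · intro h p hp
      -- all lengths equal, so M = max(len p0, 0) propagated = len p0 = len p
      have hall : ∀ q ∈ p0 :: rest, (q.length : Int) = (p0.length : Int) := by
        intro q hq
        exact h _ (by rw [hlens]; exact List.mem_map_of_mem hq) _
          (by rw [hlens]; exact List.mem_map_of_mem (List.mem_cons_self))
      have hMle : M ≤ (p0.length : Int) := by
        rw [hMfold]
        have : ∀ (xs : List Int) (a c : Int), a ≤ c → (∀ x ∈ xs, x ≤ c) →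
            xs.foldl (fun m x => max x m) a ≤ c := by
          intro xs
          induction xs with
          | nil => intro a c h1 _; simpa using h1
          | cons y ys ih =>
              intro a c h1 h2
              simp only [List.foldl_cons]
              exact ih _ _ (max_le (h2 y (by simp)) h1) (fun x hx => h2 x (by simp [hx]))
        apply this
        · positivity
        · intro x hx
          rw [hlens] at hx
          simp only [List.mem_map] at hx
          obtain ⟨q, hq, rfl⟩ := hx
          rw [hall q hq]
      rw [hall p hp]
      exact hMle

-- ===== VERDICT (by name: the statement is the Claim_ definition above) =====
theorem level_has_been_extended_spec : Claim_equal_level_has_been_extended := by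
  intro paths _
  exact level_has_been_extended_eq paths
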